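-- pv_equiv track=rewrite | github.com/wh-jung0522/AlgorithmStudy | 1.Hash/4_BestAlbum.py | sumandlist2dict
-- ===== SOURCE A (Python) =====
-- def sumandlist2dict(order_dic, info_dic):
--     sum_dict = {}
--     order_dict = {}
--     return_list = []
--     for key,value in order_dic.items():
--         sum, return_order = sumandlist(info_dic.get(key),value)
--         sum_dict[key] = sum
--         order_dict[key] = return_order
--
--     sum_dict = sorted(sum_dict.items(),key=(lambda x:x[1]),reverse=True)
--     for key,value in sum_dict:
--         return_list.extend(order_dict.get(key))
--     return return_list
--
-- def sumandlist(plays_list,ordered_list):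
--     sum = 0
--     best_order = []## playlist order
--     return_order = []
--     for i in range(len(plays_list)):
--         sum+=plays_list[i]
--         if(len(best_order)==0):
--             best_order.append(i)
--         elif(plays_list[best_order[0]]<plays_list[i]):
--             best_order.insert(0,i)
--         elif(len(best_order)==1):
--             best_order.append(i)
--         elif(plays_list[best_order[1]]<plays_list[i]):
--             best_order[1] = i
--
--     return_order.append(ordered_list[best_order[0]])
--     if (len(ordered_list) > 1):
--         return_order.append(ordered_list[best_order[1]])
--     return sum, return_order
-- ===== SOURCE B (Python) =====
-- def summarize(plays, ordered):
--     # total plays plus the tracks of the (at most two) best play counts,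
--     # earliest index winning ties; second track only when the track list has >1 entry
--     idx = range(len(plays))
--     b0 = max(idx, key=lambda i: plays[i])
--     tracks = [ordered[b0]]
--     if len(ordered) > 1:
--         b1 = max((i for i in idx if i != b0), key=lambda i: plays[i])
--         tracks.append(ordered[b1])
--     return (sum(plays), tracks)
--
-- def sumandlist2dict(order_dic, info_dic):
--     best = {}
--     for key, ordered in order_dic.items():
--         best[key] = summarize(info_dic[key], ordered)
--     out = []
--     for key, (total, tracks) in sorted(best.items(), key=lambda kv: kv[1][0], reverse=True):
--         out.extend(tracks)
--     return out
-- ===== Notes on version B (the rewrite author's own statement) =====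
-- stated objective: simpler
-- what changed: Replaces the manual top-2 tracking loop (a best_order list mutated through four branch cases) by two first-maximum selections over the index range plus sum(), and collapses the two parallel dicts (sums, track lists) into one dict of (total, tracks) pairs sorted once by total descending.
-- outside the precondition, e.g. on sumandlist2dict({'a': [1]}, {'a': [5, 3]}): A returns [1], B returns [1]
import Mathlib
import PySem

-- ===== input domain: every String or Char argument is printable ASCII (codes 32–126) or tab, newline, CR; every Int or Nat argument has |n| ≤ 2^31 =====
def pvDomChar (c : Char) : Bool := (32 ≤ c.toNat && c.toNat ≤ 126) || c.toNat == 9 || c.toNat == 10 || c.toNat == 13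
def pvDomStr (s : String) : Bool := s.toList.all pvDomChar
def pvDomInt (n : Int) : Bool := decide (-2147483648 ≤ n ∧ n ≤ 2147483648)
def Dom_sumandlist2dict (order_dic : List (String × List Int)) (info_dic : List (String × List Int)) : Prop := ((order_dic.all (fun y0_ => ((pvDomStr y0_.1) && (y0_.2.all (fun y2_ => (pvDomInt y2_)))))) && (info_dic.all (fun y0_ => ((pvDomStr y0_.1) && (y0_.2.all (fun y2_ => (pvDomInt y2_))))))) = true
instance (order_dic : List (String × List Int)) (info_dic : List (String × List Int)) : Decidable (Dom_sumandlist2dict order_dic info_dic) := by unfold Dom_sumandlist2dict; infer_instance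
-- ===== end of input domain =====

-- B replaces A's four-branch manual top-2 scan by two first-maximum selections plus sum(),
-- and merges A's two parallel dicts into one dict of (total, tracks) pairs (objective: simpler).


-- ===== PORT A =====
-- helper sumandlist: the list indexings plays_list[...] / ordered_list[...] are ported with
-- pyGetD (Pre_ keeps every index in range; where Python would raise IndexError nothing is claimed)
def sumandlistA (plays_list : List Int) (ordered_list : List Int) : Int × List Int :=
  let st := (PySem.List.pyRange 0 (plays_list.length : Int) 1).foldl
    (fun (st : Int × List Int) i =>
      let s := st.1 + PySem.List.pyGetD plays_list i 0
      let best := st.2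
      if best.length == 0 then (s, best ++ [i])
      else if PySem.List.pyGetD plays_list (PySem.List.pyGetD best 0 0) 0 < PySem.List.pyGetD plays_list i 0 then (s, i :: best)
      else if best.length == 1 then (s, best ++ [i])
      else if PySem.List.pyGetD plays_list (PySem.List.pyGetD best 1 0) 0 < PySem.List.pyGetD plays_list i 0 then (s, best.set 1 i)
      else (s, best))
    ((0 : Int), ([] : List Int))
  let ro := [PySem.List.pyGetD ordered_list (PySem.List.pyGetD st.2 0 0) 0]
  let ro := if 1 < ordered_list.length then ro ++ [PySem.List.pyGetD ordered_list (PySem.List.pyGetD st.2 1 0) 0] else ro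
  (st.1, ro)

-- info_dic.get(key) returning None (missing key) makes Python raise in len(); Pre_ excludes it,
-- the port uses .getD [] there
def sumandlist2dict (order_dic : List (String × List Int)) (info_dic : List (String × List Int)) : List Int :=
  let dicts := order_dic.foldl
    (fun (d : PySem.Dict String Int × PySem.Dict String (List Int)) kv =>
      let r := sumandlistA (((PySem.Dict.mk info_dic).get? kv.1).getD []) kv.2
      (d.1.insert kv.1 r.1, d.2.insert kv.1 r.2))
    (PySem.Dict.mk [], PySem.Dict.mk [])
  (PySem.List.sorted dicts.1.items (fun x => x.2) true).foldl
    (fun acc kv => acc ++ ((dicts.2.get? kv.1).getD [])) []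

-- ===== PORT B =====
-- max(..., key=...) is PySem.List.max? (first maximal element); sum(plays) is List.sum
def summarizeB (plays : List Int) (ordered : List Int) : Int × List Int :=
  let idx := PySem.List.pyRange 0 (plays.length : Int) 1
  let b0 := (PySem.List.max? idx (fun i => PySem.List.pyGetD plays i 0)).getD 0
  let tracks := [PySem.List.pyGetD ordered b0 0]
  let tracks := if 1 < ordered.length then
      tracks ++ [PySem.List.pyGetD ordered
        ((PySem.List.max? (idx.filter (fun i => !(i == b0))) (fun i => PySem.List.pyGetD plays i 0)).getD 0) 0]
    else tracks
  (plays.sum, tracks)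

def sumandlist2dict_alt (order_dic : List (String × List Int)) (info_dic : List (String × List Int)) : List Int :=
  let best := order_dic.foldl
    (fun (d : PySem.Dict String (Int × List Int)) kv =>
      d.insert kv.1 (summarizeB (((PySem.Dict.mk info_dic).get? kv.1).getD []) kv.2))
    (PySem.Dict.mk [])
  (PySem.List.sorted best.items (fun kv => kv.2.1) true).foldl
    (fun acc kv => acc ++ kv.2.2) []

-- ===== PRECONDITION & SPEC =====
-- Pre_: every genre of order_dic is present in info_dic with a nonempty plays list that is not
-- longer than its track list (and has ≥ 2 entries when the track list has > 1).  Outside this A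
-- raises (TypeError on a missing key, IndexError/ValueError on empty or too-short lists) except
-- when a longer plays list happens to put both top indices inside the shorter track list — an
-- accidental return, on which B returns the same value anyway (see cites).
def Pre_sumandlist2dict (order_dic : List (String × List Int)) (info_dic : List (String × List Int)) : Prop :=
  ∀ p ∈ order_dic,
    1 ≤ (((PySem.Dict.mk info_dic).get? p.1).getD []).length ∧
    (((PySem.Dict.mk info_dic).get? p.1).getD []).length ≤ p.2.length ∧
    (1 < p.2.length → 2 ≤ (((PySem.Dict.mk info_dic).get? p.1).getD []).length)
instance (order_dic : List (String × List Int)) (info_dic : List (String × List Int)) : Decidable (Pre_sumandlist2dict order_dic info_dic) := by unfold Pre_sumandlist2dict; infer_instance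

def pvWitness_sumandlist2dict : (List (String × List Int)) × (List (String × List Int)) :=
  ([("pop", [10, 20]), ("rock", [7])], [("pop", [500, 600]), ("rock", [150])])

def Spec_sumandlist2dict (order_dic : List (String × List Int)) (info_dic : List (String × List Int)) (out : List Int) : Prop := out = sumandlist2dict_alt order_dic info_dic
instance (order_dic : List (String × List Int)) (info_dic : List (String × List Int)) (out : List Int) : Decidable (Spec_sumandlist2dict order_dic info_dic out) := by unfold Spec_sumandlist2dict; infer_instance

-- ===== CLAIM (what is proved, stated in full; the proofs are below) =====
def Claim_equal_sumandlist2dict : Prop := ∀ (order_dic : List (String × List Int)) (info_dic : List (String × List Int)), Dom_sumandlist2dict order_dic info_dic → Pre_sumandlist2dict order_dic info_dic → Spec_sumandlist2dict order_dic info_dic (sumandlist2dict order_dic info_dic)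

-- ===== LEMMAS AND PROOFS =====

-- A's loop body, named for the proofs
def stepA (plays : List Int) : (Int × List Int) → Int → (Int × List Int) := fun st i =>
  let s := st.1 + PySem.List.pyGetD plays i 0
  let best := st.2
  if best.length == 0 then (s, best ++ [i])
  else if PySem.List.pyGetD plays (PySem.List.pyGetD best 0 0) 0 < PySem.List.pyGetD plays i 0 then (s, i :: best)
  else if best.length == 1 then (s, best ++ [i])
  else if PySem.List.pyGetD plays (PySem.List.pyGetD best 1 0) 0 < PySem.List.pyGetD plays i 0 then (s, best.set 1 i)
  else (s, best)

lemma max?_append_singleton {α κ : Type} [LT κ] [DecidableLT κ] (xs : List α) (x : α) (key : α → κ) :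
    PySem.List.max? (xs ++ [x]) key =
      match PySem.List.max? xs key with
      | none => some x
      | some m => if key m < key x then some x else some m := by
  simp only [PySem.List.max?, List.foldl_append, List.foldl_cons, List.foldl_nil]
  rfl

-- the loop invariant: after scanning range(k), .1 is the partial sum, the head of best_order is
-- the first argmax of the prefix, and (for k ≥ 2) its second entry the first argmax of the rest
lemma loopA (plays : List Int) (k : Nat) (hk : 1 ≤ k) :
    ∃ m0 : Int,
      PySem.List.max? (PySem.List.pyRange 0 (k : Int) 1) (fun i => PySem.List.pyGetD plays i 0) = some m0 ∧
      ((PySem.List.pyRange 0 (k : Int) 1).foldl (stepA plays) (0, [])).1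
        = ((PySem.List.pyRange 0 (k : Int) 1).map (fun i => PySem.List.pyGetD plays i 0)).sum ∧
      ((k = 1 ∧ ((PySem.List.pyRange 0 (k : Int) 1).foldl (stepA plays) (0, [])).2 = [m0]) ∨
       (2 ≤ k ∧ ∃ m1 junk,
          ((PySem.List.pyRange 0 (k : Int) 1).foldl (stepA plays) (0, [])).2 = m0 :: m1 :: junk ∧
          PySem.List.max? ((PySem.List.pyRange 0 (k : Int) 1).filter (fun i => !(i == m0)))
            (fun i => PySem.List.pyGetD plays i 0) = some m1)) := by
  induction k with
  | zero => omega
  | succ k ih =>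
    rcases Nat.eq_or_lt_of_le hk with h1 | h2
    · -- k + 1 = 1 : one loop iteration
      have hk0 : k = 0 := by omega
      subst hk0
      refine ⟨0, ?_, ?_, Or.inl ⟨rfl, ?_⟩⟩ <;>
        norm_num [PySem.List.pyRange_one, PySem.List.max?, stepA, PySem.List.pyGetD]
    · -- k ≥ 1 : one more iteration on top of the invariant
      have hk' : 1 ≤ k := by omega
      obtain ⟨m0, hmax, hsum, hinv⟩ := ih hk'
      have hsplit : PySem.List.pyRange 0 ((k + 1 : Nat) : Int) 1
          = PySem.List.pyRange 0 (k : Int) 1 ++ [(k : Int)] := by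
        push_cast
        exact PySem.List.pyRange_one_succ_right (by positivity)
      have hm0lt : m0 < (k : Int) := by
        have := PySem.List.mem_pyRange_one.mp (PySem.List.max?_mem hmax)
        omega
      have hfk : (PySem.List.pyRange 0 (k : Int) 1).filter (fun i => !(i == (k : Int)))
          = PySem.List.pyRange 0 (k : Int) 1 := by
        apply List.filter_eq_self.mpr
        intro a ha
        have := PySem.List.mem_pyRange_one.mp ha
        simp; omega
      rw [hsplit]
      simp only [List.foldl_append, List.foldl_cons, List.foldl_nil, List.map_append,
        List.sum_append, List.map_cons, List.map_nil, List.sum_cons, List.sum_nil,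
        max?_append_singleton, List.filter_append, hmax]
      rcases hinv with ⟨hk1, hB⟩ | ⟨hk2, m1, junk, hB, hmax1⟩
      · -- previous best_order = [m0] (k = 1, m0 = 0)
        subst hk1
        have hm0rng := PySem.List.mem_pyRange_one.mp (PySem.List.max?_mem hmax)
        have hm00 : m0 = 0 := by omega
        subst hm00
        rw [Nat.cast_one] at hmax hB hfk hsum ⊢
        have hr : PySem.List.pyRange 0 (1 : Int) 1 = [0] := by
          norm_num [PySem.List.pyRange_one]
        rw [hr] at hmax hB hsum ⊢
        by_cases hc : (PySem.List.pyGet? plays 0).getD 0 < (PySem.List.pyGet? plays 1).getD 0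
        · refine ⟨1, ?_, ?_, Or.inr ⟨by omega, 0, [], ?_, ?_⟩⟩ <;>
            simp [stepA, hB, hsum, PySem.List.pyGetD, PySem.List.max?, hc]
        · refine ⟨0, ?_, ?_, Or.inr ⟨by omega, 1, [], ?_, ?_⟩⟩ <;>
            simp [stepA, hB, hsum, PySem.List.pyGetD, PySem.List.max?, hc]
      · -- previous best_order = m0 :: m1 :: junk (k ≥ 2)
        have hm1lt : m1 < (k : Int) := by
          have hmem := PySem.List.max?_mem hmax1
          have := PySem.List.mem_pyRange_one.mp (List.mem_of_mem_filter hmem)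
          omega
        have hbm0 : PySem.List.pyGetD (m0 :: m1 :: junk) 0 0 = m0 := by
          simp [PySem.List.pyGetD]
        have hbm1 : PySem.List.pyGetD (m0 :: m1 :: junk) 1 0 = m1 := by
          simp [PySem.List.pyGetD]
        by_cases hc0 : PySem.List.pyGetD plays m0 0 < plays[k]?.getD 0
        · -- new leader at index k; the old leader becomes the runner-up
          refine ⟨(k : Int), ?_, ?_, Or.inr ⟨by omega, m0, m1 :: junk, ?_, ?_⟩⟩
          · simp [hc0]
          · simp [stepA, hB, hsum, hbm0, hc0]
          · simp [stepA, hB, hbm0, hc0]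
          · simp [hfk, hmax]
        · by_cases hc1 : PySem.List.pyGetD plays m1 0 < plays[k]?.getD 0
          · -- index k replaces the runner-up
            refine ⟨m0, ?_, ?_, Or.inr ⟨by omega, (k : Int), junk, ?_, ?_⟩⟩
            · simp [hc0]
            · simp [stepA, hB, hsum, hbm0, hbm1, hc0, hc1]
            · simp [stepA, hB, hbm0, hbm1, hc0, hc1]
            · have hne : ((k : Int) == m0) = false := by simp; omega
              rw [List.filter_singleton]
              simp only [hne, Bool.not_false, cond_true]
              rw [max?_append_singleton, hmax1]
              simp [hc1]
          · -- nothing changes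
            refine ⟨m0, ?_, ?_, Or.inr ⟨by omega, m1, junk, ?_, ?_⟩⟩
            · simp [hc0]
            · simp [stepA, hB, hsum, hbm0, hbm1, hc0, hc1]
            · simp [stepA, hB, hbm0, hbm1, hc0, hc1]
            · have hne : ((k : Int) == m0) = false := by simp; omega
              rw [List.filter_singleton]
              simp only [hne, Bool.not_false, cond_true]
              rw [max?_append_singleton, hmax1]
              simp [hc1]

lemma sumandlistA_eq_summarizeB (plays ordered : List Int)
    (h1 : 1 ≤ plays.length) (h2 : 1 < ordered.length → 2 ≤ plays.length) :
    sumandlistA plays ordered = summarizeB plays ordered := by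
  obtain ⟨m0, hmax, hsum, hinv⟩ := loopA plays plays.length h1
  have hmapsum : ((PySem.List.pyRange 0 (plays.length : Int) 1).map
      (fun i => PySem.List.pyGetD plays i 0)).sum = plays.sum := by
    rw [PySem.List.map_pyGetD_pyRange_zero' plays 0]
  have hA : sumandlistA plays ordered =
      (((PySem.List.pyRange 0 (plays.length : Int) 1).foldl (stepA plays) (0, [])).1,
       if 1 < ordered.length then
         [PySem.List.pyGetD ordered (PySem.List.pyGetD
            ((PySem.List.pyRange 0 (plays.length : Int) 1).foldl (stepA plays) (0, [])).2 0 0) 0,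
          PySem.List.pyGetD ordered (PySem.List.pyGetD
            ((PySem.List.pyRange 0 (plays.length : Int) 1).foldl (stepA plays) (0, [])).2 1 0) 0]
       else
         [PySem.List.pyGetD ordered (PySem.List.pyGetD
            ((PySem.List.pyRange 0 (plays.length : Int) 1).foldl (stepA plays) (0, [])).2 0 0) 0]) := rfl
  have hBdef : summarizeB plays ordered =
      (plays.sum,
       if 1 < ordered.length then
         [PySem.List.pyGetD ordered
            ((PySem.List.max? (PySem.List.pyRange 0 (plays.length : Int) 1)
              (fun i => PySem.List.pyGetD plays i 0)).getD 0) 0,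
          PySem.List.pyGetD ordered
            ((PySem.List.max? ((PySem.List.pyRange 0 (plays.length : Int) 1).filter
                (fun i => !(i == (PySem.List.max? (PySem.List.pyRange 0 (plays.length : Int) 1)
                  (fun i => PySem.List.pyGetD plays i 0)).getD 0)))
              (fun i => PySem.List.pyGetD plays i 0)).getD 0) 0]
       else
         [PySem.List.pyGetD ordered
            ((PySem.List.max? (PySem.List.pyRange 0 (plays.length : Int) 1)
              (fun i => PySem.List.pyGetD plays i 0)).getD 0) 0]) := rfl
  rw [hA, hBdef, hmax]
  rcases hinv with ⟨hk1, hB⟩ | ⟨hk2, m1, junk, hB, hmax1⟩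
  · have hol : ¬ 1 < ordered.length := fun h => by have := h2 h; omega
    have hpg0 : PySem.List.pyGetD [m0] 0 0 = m0 := by simp [PySem.List.pyGetD]
    rw [hsum, hmapsum, hB]
    simp [hol, hpg0]
  · have hbm0 : PySem.List.pyGetD (m0 :: m1 :: junk) 0 0 = m0 := by
      simp [PySem.List.pyGetD]
    have hbm1 : PySem.List.pyGetD (m0 :: m1 :: junk) 1 0 = m1 := by
      simp [PySem.List.pyGetD]
    rw [hsum, hmapsum, hB]
    by_cases hol : 1 < ordered.length
    · simp only [hol, if_pos, Option.getD_some, hbm0, hbm1, hmax1]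
    · simp [hol, hbm0]

lemma insertBy_map {α β : Type} (f : α → β) (bef : β → β → Bool) (x : α) (l : List α) :
    PySem.List.insertBy bef (f x) (l.map f)
      = (PySem.List.insertBy (fun a b => bef (f a) (f b)) x l).map f := by
  induction l with
  | nil => simp [PySem.List.insertBy]
  | cons y ys ih =>
    simp only [List.map_cons, PySem.List.insertBy]
    by_cases h : bef (f x) (f y) <;> simp [h, ih]

lemma foldl_insertBy_map {α β : Type} (f : α → β) (bef : β → β → Bool) :
    ∀ (l : List α) (acc : List α),
      (l.map f).foldl (fun a x => PySem.List.insertBy bef x a) (acc.map f)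
        = (l.foldl (fun a x => PySem.List.insertBy (fun p q => bef (f p) (f q)) x a) acc).map f := by
  intro l
  induction l with
  | nil => intro acc; simp
  | cons y ys ih =>
    intro acc
    simp only [List.map_cons, List.foldl_cons]
    rw [insertBy_map f bef y acc]
    exact ih _

lemma sorted_rev_map {α β κ : Type} [LT κ] [DecidableLT κ] (f : α → β) (key : β → κ) (l : List α) :
    PySem.List.sorted (l.map f) key true
      = (PySem.List.sorted l (fun a => key (f a)) true).map f := by
  have h := foldl_insertBy_map f (fun a b => decide (key b < key a)) l []
  simpa [PySem.List.sorted] using h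

lemma items_insert_map {ν μ : Type} (g : ν → μ) (l : List (String × ν)) (k : String) (v : ν) :
    (PySem.Dict.insert (PySem.Dict.mk (l.map (fun p => (p.1, g p.2)))) k (g v)).items
      = ((PySem.Dict.insert (PySem.Dict.mk l) k v).items).map (fun p => (p.1, g p.2)) := by
  have hc : (PySem.Dict.mk (l.map (fun p => (p.1, g p.2)))).contains k
      = (PySem.Dict.mk l).contains k := by
    simp [PySem.Dict.contains, List.any_map, Function.comp_def]
  by_cases h : (PySem.Dict.mk l).contains k = true
  · simp only [PySem.Dict.insert, hc, h, if_pos]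
    simp only [List.map_map]
    apply List.map_congr_left
    intro p _
    by_cases hp : p.1 = k <;> simp [hp]
  · simp only [PySem.Dict.insert, hc, h, if_neg, Bool.not_eq_true]
    simp

-- the two loops over order_dic build pointwise-corresponding dictionaries
lemma outer_fold (info : List (String × List Int)) :
    ∀ (l : List (String × List Int)) (db : PySem.Dict String (Int × List Int)),
      (∀ p ∈ l,
        1 ≤ (((PySem.Dict.mk info).get? p.1).getD []).length ∧
        (1 < p.2.length → 2 ≤ (((PySem.Dict.mk info).get? p.1).getD []).length)) →
      (l.foldl (fun (d : PySem.Dict String Int × PySem.Dict String (List Int)) kv =>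
          let r := sumandlistA (((PySem.Dict.mk info).get? kv.1).getD []) kv.2
          (d.1.insert kv.1 r.1, d.2.insert kv.1 r.2))
        (PySem.Dict.mk (db.items.map (fun p => (p.1, p.2.1))),
         PySem.Dict.mk (db.items.map (fun p => (p.1, p.2.2)))))
      = (PySem.Dict.mk ((l.foldl (fun (d : PySem.Dict String (Int × List Int)) kv =>
            d.insert kv.1 (summarizeB (((PySem.Dict.mk info).get? kv.1).getD []) kv.2)) db).items.map (fun p => (p.1, p.2.1))),
         PySem.Dict.mk ((l.foldl (fun (d : PySem.Dict String (Int × List Int)) kv =>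
            d.insert kv.1 (summarizeB (((PySem.Dict.mk info).get? kv.1).getD []) kv.2)) db).items.map (fun p => (p.1, p.2.2)))) := by
  intro l
  induction l with
  | nil => intro db hpre; rfl
  | cons kv rest ih =>
    intro db hpre
    have hhead := hpre kv (by simp)
    have hr : sumandlistA (((PySem.Dict.mk info).get? kv.1).getD []) kv.2
        = summarizeB (((PySem.Dict.mk info).get? kv.1).getD []) kv.2 :=
      sumandlistA_eq_summarizeB _ _ hhead.1 hhead.2
    simp only [List.foldl_cons]
    rw [show (PySem.Dict.insert (PySem.Dict.mk (db.items.map (fun p => (p.1, p.2.1)))) kv.1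
          (sumandlistA (((PySem.Dict.mk info).get? kv.1).getD []) kv.2).1,
         PySem.Dict.insert (PySem.Dict.mk (db.items.map (fun p => (p.1, p.2.2)))) kv.1
          (sumandlistA (((PySem.Dict.mk info).get? kv.1).getD []) kv.2).2)
        = (PySem.Dict.mk ((db.insert kv.1 (summarizeB (((PySem.Dict.mk info).get? kv.1).getD []) kv.2)).items.map (fun p => (p.1, p.2.1))),
           PySem.Dict.mk ((db.insert kv.1 (summarizeB (((PySem.Dict.mk info).get? kv.1).getD []) kv.2)).items.map (fun p => (p.1, p.2.2)))) from ?_]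
    · exact ih _ (fun p hp => hpre p (by simp [hp]))
    · rw [hr]
      have e1 := items_insert_map (fun v : Int × List Int => v.1) db.items kv.1
        (summarizeB (((PySem.Dict.mk info).get? kv.1).getD []) kv.2)
      have e2 := items_insert_map (fun v : Int × List Int => v.2) db.items kv.1
        (summarizeB (((PySem.Dict.mk info).get? kv.1).getD []) kv.2)
      refine Prod.ext ?_ ?_ <;> apply PySem.Dict.ext <;> simp [e1, e2]

-- ===== VERDICT (by name: the statement is the Claim_ definition above) =====
theorem sumandlist2dict_spec : Claim_equal_sumandlist2dict := by
  intro order_dic info_dic _hdom hpre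
  unfold Spec_sumandlist2dict sumandlist2dict sumandlist2dict_alt
  have hout := outer_fold info_dic order_dic (PySem.Dict.mk [])
    (fun p hp => ⟨(hpre p hp).1, (hpre p hp).2.2⟩)
  simp only [List.map_nil] at hout
  rw [hout]
  set DB := order_dic.foldl (fun (d : PySem.Dict String (Int × List Int)) kv =>
      d.insert kv.1 (summarizeB (((PySem.Dict.mk info_dic).get? kv.1).getD []) kv.2))
      (PySem.Dict.mk []) with hDB
  have hnodup : DB.keys.Nodup := by
    apply PySem.Dict.nodup_keys_foldl_insert_key order_dic (fun kv => kv.1)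
      (fun _ kv => summarizeB (((PySem.Dict.mk info_dic).get? kv.1).getD []) kv.2)
    simp [PySem.Dict.keys]
  have hget2 : ∀ k : String,
      (PySem.Dict.mk (DB.items.map (fun p => (p.1, p.2.2)))).get? k
        = (DB.get? k).map (fun v => v.2) := by
    intro k
    simp [PySem.Dict.get?, List.find?_map, Function.comp_def, Option.map_map]
  dsimp only
  rw [sorted_rev_map (fun p : String × (Int × List Int) => (p.1, p.2.1))
      (fun x : String × Int => x.2) DB.items, List.foldl_map]
  apply PySem.List.foldl_congr_mem
  intro acc p hp
  have hpmem : p ∈ DB.items := (PySem.List.mem_sorted _ _ _ _).mp hp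
  have hgp : DB.get? p.1 = some p.2 :=
    (PySem.Dict.get?_eq_some_iff_mem_items DB p.1 p.2 hnodup).mpr hpmem
  rw [hget2, hgp]
  rfl
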